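-- pv_equiv track=rewrite | github.com/Markovmodcn/Lotterymcp | examples/python/common/dlt_analysis.py | _pick_validation_windows
-- ===== SOURCE A (Python) =====
-- def _pick_validation_windows(record_count: int) -> list[int]:
--     candidates = [1, 3, 5, 10, 20, 30, 50, 80]
--     windows = [window for window in candidates if record_count > window + 1]
--     if windows:
--         return windows
--     if record_count > 2:
--         return [record_count - 2]
--     return []
-- ===== SOURCE B (Python) =====
-- def _pick_validation_windows(record_count: int) -> list[int]:
--     # Binary search for the first candidate >= record_count - 1; the answer is the
--     # prefix before it (the filter predicate selects a prefix of the ascending list).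
--     # The original's record_count > 2 fallback is dead code: record_count > 2 already
--     # makes candidate 1 pass the filter, so the prefix is non-empty there.
--     candidates = [1, 3, 5, 10, 20, 30, 50, 80]
--     target = record_count - 1
--     lo, hi = 0, len(candidates)
--     while lo < hi:
--         mid = (lo + hi) // 2
--         if candidates[mid] < target:
--             lo = mid + 1
--         else:
--             hi = mid
--     return candidates[:lo]
-- ===== Notes on version B (the rewrite author's own statement) =====
-- stated objective: alternative
-- what changed: Replaces the linear filter over the fixed ascending candidate list (plus a dead record_count>2 fallback) with a hand-rolled binary search for the boundary record_count-1 followed by a prefix slice; the fallback is omitted because it is unreachable (record_count>2 already admits candidate 1).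
import Mathlib
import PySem

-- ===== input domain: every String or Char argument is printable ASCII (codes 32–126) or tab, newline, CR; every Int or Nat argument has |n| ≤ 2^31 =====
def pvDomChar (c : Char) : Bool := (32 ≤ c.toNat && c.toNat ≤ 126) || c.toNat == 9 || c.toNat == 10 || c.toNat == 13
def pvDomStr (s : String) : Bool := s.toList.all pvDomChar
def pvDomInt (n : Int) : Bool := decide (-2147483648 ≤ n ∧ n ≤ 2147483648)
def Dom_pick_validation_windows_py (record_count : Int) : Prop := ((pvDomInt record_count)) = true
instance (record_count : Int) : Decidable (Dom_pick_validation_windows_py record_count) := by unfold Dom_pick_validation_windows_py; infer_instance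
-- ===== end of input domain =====

-- B replaces A's linear filter over the fixed ascending candidate list (plus a fallback branch
-- that is unreachable, since record_count > 2 already admits candidate 1) with a hand-rolled
-- binary search for the boundary record_count - 1 followed by a prefix slice (objective: alternative).


-- ===== PORT A =====
def pick_validation_windows_py (record_count : Int) : List Int :=
  let candidates : List Int := [1, 3, 5, 10, 20, 30, 50, 80]
  let windows := candidates.filter (fun w => decide (record_count > w + 1))
  if windows ≠ [] then windows
  else if record_count > 2 then [record_count - 2]
  else []

-- ===== PORT B =====
-- hand-rolled bisect_left loop from Source B, as structural recursion on hi - lo;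
-- (lo+hi)//2 on nonnegative Nats is exactly Nat division
def pvBS (cands : List Int) (target : Int) (lo hi : Nat) : Nat :=
  if lo < hi then
    let mid := (lo + hi) / 2
    if cands.getD mid 0 < target then pvBS cands target (mid + 1) hi
    else pvBS cands target lo mid
  else lo
termination_by hi - lo
decreasing_by all_goals omega

-- candidates[:lo] with 0 ≤ lo ≤ len, where the Python slice is exactly List.take
def pick_validation_windows_py_alt (record_count : Int) : List Int :=
  let candidates : List Int := [1, 3, 5, 10, 20, 30, 50, 80]
  candidates.take (pvBS candidates (record_count - 1) 0 candidates.length)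

-- ===== PRECONDITION & SPEC =====
def Spec_pick_validation_windows_py (record_count : Int) (out : List Int) : Prop := out = pick_validation_windows_py_alt record_count
instance (record_count : Int) (out : List Int) : Decidable (Spec_pick_validation_windows_py record_count out) := by unfold Spec_pick_validation_windows_py; infer_instance

-- ===== CLAIM (what is proved, stated in full; the proofs are below) =====
def Claim_equal_pick_validation_windows_py : Prop := ∀ (record_count : Int), Dom_pick_validation_windows_py record_count → Spec_pick_validation_windows_py record_count (pick_validation_windows_py record_count)

-- ===== LEMMAS AND PROOFS =====

-- the binary search on the fixed candidate list computes the rank of t, written as an if-chain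
set_option maxHeartbeats 2000000 in
lemma pvBS_val (t : Int) : pvBS [1, 3, 5, 10, 20, 30, 50, 80] t 0 8 =
    (if 80 < t then 8 else if 50 < t then 7 else if 30 < t then 6 else if 20 < t then 5
     else if 10 < t then 4 else if 5 < t then 3 else if 3 < t then 2 else if 1 < t then 1 else 0) := by
  by_cases h1 : 1 < t <;> by_cases h3 : 3 < t <;> by_cases h5 : 5 < t <;> by_cases h10 : 10 < t <;>
    by_cases h20 : 20 < t <;> by_cases h30 : 30 < t <;> by_cases h50 : 50 < t <;> by_cases h80 : 80 < t <;>
    first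
      | omega
      | (repeat (rw [pvBS]; norm_num [h1, h3, h5, h10, h20, h30, h50, h80]))

-- ===== VERDICT (by name: the statement is the Claim_ definition above) =====
set_option maxHeartbeats 2000000 in
theorem pick_validation_windows_py_spec : Claim_equal_pick_validation_windows_py := by
  intro rc _
  unfold Spec_pick_validation_windows_py pick_validation_windows_py pick_validation_windows_py_alt
  simp only [List.length_cons, List.length_nil]
  rw [pvBS_val]
  have e1 : (2 : Int) < rc ↔ (1 : Int) < rc - 1 := by omega
  have e3 : (4 : Int) < rc ↔ (3 : Int) < rc - 1 := by omega
  have e5 : (6 : Int) < rc ↔ (5 : Int) < rc - 1 := by omega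
  have e10 : (11 : Int) < rc ↔ (10 : Int) < rc - 1 := by omega
  have e20 : (21 : Int) < rc ↔ (20 : Int) < rc - 1 := by omega
  have e30 : (31 : Int) < rc ↔ (30 : Int) < rc - 1 := by omega
  have e50 : (51 : Int) < rc ↔ (50 : Int) < rc - 1 := by omega
  have e80 : (81 : Int) < rc ↔ (80 : Int) < rc - 1 := by omega
  by_cases h1 : (1 : Int) < rc - 1 <;> by_cases h3 : (3 : Int) < rc - 1 <;>
    by_cases h5 : (5 : Int) < rc - 1 <;> by_cases h10 : (10 : Int) < rc - 1 <;>
    by_cases h20 : (20 : Int) < rc - 1 <;> by_cases h30 : (30 : Int) < rc - 1 <;>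
    by_cases h50 : (50 : Int) < rc - 1 <;> by_cases h80 : (80 : Int) < rc - 1 <;>
    first
      | omega
      | simp [List.filter, e1, e3, e5, e10, e20, e30, e50, e80, h1, h3, h5, h10, h20, h30, h50, h80]
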